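-- pv_equiv track=rewrite | github.com/wisalkhanmv/twelve-ai-agents | main.py | group_messages_by_round
-- ===== SOURCE A (Python) =====
-- def group_messages_by_round(messages, max_rounds):
--     """Group messages by round and format for display"""
--     rounds = []
--     current_round = 0
--     round_messages = []
--
--     for msg in messages:
--         if msg["role"] == "moderator" and len(round_messages) > 0:
--             rounds.append(round_messages)
--             round_messages = []
--         round_messages.append(msg)
--
--     if round_messages:
--         rounds.append(round_messages)
--
--     return rounds
-- ===== SOURCE B (Python) =====
-- def group_messages_by_round(messages, max_rounds):
--     """Group messages by round and format for display"""
--     rounds = []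
--     rest = messages
--     while rest:
--         i = 1
--         while i < len(rest) and rest[i]["role"] != "moderator":
--             i += 1
--         rounds.append(rest[:i])
--         rest = rest[i:]
--     return rounds
-- ===== Notes on version B (the rewrite author's own statement) =====
-- stated objective: alternative
-- what changed: A makes one pass with an accumulator that is flushed at each moderator; B repeatedly peels one whole round off the front by scanning ahead to the next moderator and slicing, with no flush/accumulator state.
-- outside the precondition, e.g. on group_messages_by_round([{'x': '1'}], 3): A raises KeyError, B returns [[{'x': '1'}]]
import Mathlib
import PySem

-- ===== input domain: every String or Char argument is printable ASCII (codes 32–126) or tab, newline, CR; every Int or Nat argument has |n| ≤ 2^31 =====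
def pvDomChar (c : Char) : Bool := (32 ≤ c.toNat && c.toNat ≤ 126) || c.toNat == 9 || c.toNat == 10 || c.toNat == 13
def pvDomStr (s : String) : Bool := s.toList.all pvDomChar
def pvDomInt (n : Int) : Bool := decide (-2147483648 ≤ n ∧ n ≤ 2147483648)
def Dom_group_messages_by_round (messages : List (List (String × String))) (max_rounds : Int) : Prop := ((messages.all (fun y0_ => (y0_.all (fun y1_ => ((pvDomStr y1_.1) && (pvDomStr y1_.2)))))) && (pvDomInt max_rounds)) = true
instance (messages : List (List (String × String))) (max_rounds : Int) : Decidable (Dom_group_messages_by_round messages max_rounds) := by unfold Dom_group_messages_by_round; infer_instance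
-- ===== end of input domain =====

-- B peels one round at a time by scanning ahead for the next moderator, instead of A's
-- single accumulator-flush pass; objective: alternative decomposition (same O(n) cost).
-- ===== PORT A =====
-- dict lookup msg["role"]: first pair with key "role" (exact for a Python dict rendered
-- as an association list; `none` = KeyError, excluded by Pre_ below)
def pvRole (msg : List (String × String)) : Option String :=
  (msg.find? (fun p => p.1 == "role")).map (fun p => p.2)

-- the body of A's for-loop, on state (rounds, round_messages)
def pvStepA (st : List (List (List (String × String))) × List (List (String × String)))
    (msg : List (String × String)) :
    List (List (List (String × String))) × List (List (String × String)) :=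
  let st' := if pvRole msg == some "moderator" && !st.2.isEmpty
             then (st.1 ++ [st.2], ([] : List (List (String × String))))
             else st
  (st'.1, st'.2 ++ [msg])

def group_messages_by_round (messages : List (List (String × String))) (max_rounds : Int) :
    List (List (List (String × String))) :=
  let st := messages.foldl pvStepA ([], [])
  if st.2.isEmpty then st.1 else st.1 ++ [st.2]

-- ===== PORT B =====
-- B's inner while loop: number of leading non-moderator messages of `rest`
def altScan (l : List (List (String × String))) : Nat :=
  match l with
  | [] => 0
  | m :: t => if pvRole m == some "moderator" then 0 else altScan t + 1

def group_messages_by_round_alt (messages : List (List (String × String))) (max_rounds : Int) :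
    List (List (List (String × String))) :=
  match messages with
  | [] => []
  | m :: rest =>
    let i := 1 + altScan rest
    ((m :: rest).take i) :: group_messages_by_round_alt ((m :: rest).drop i) max_rounds
termination_by messages.length
decreasing_by simp

-- ===== PRECONDITION & SPEC =====
-- Pre_ excludes exactly the inputs where Python A raises KeyError: a message without a "role" key.
def Pre_group_messages_by_round (messages : List (List (String × String))) (max_rounds : Int) : Prop :=
  (messages.all (fun m => (m.find? (fun p => p.1 == "role")).isSome)) = true
instance (messages : List (List (String × String))) (max_rounds : Int) : Decidable (Pre_group_messages_by_round messages max_rounds) := by unfold Pre_group_messages_by_round; infer_instance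

def pvWitness_group_messages_by_round : (List (List (String × String))) × Int :=
  ([[("role", "moderator")], [("role", "agent")]], 3)

def Spec_group_messages_by_round (messages : List (List (String × String))) (max_rounds : Int) (out : List (List (List (String × String)))) : Prop := out = group_messages_by_round_alt messages max_rounds
instance (messages : List (List (String × String))) (max_rounds : Int) (out : List (List (List (String × String)))) : Decidable (Spec_group_messages_by_round messages max_rounds out) := by unfold Spec_group_messages_by_round; infer_instance

-- ===== CLAIM (what is proved, stated in full; the proofs are below) =====
def Claim_equal_group_messages_by_round : Prop := ∀ (messages : List (List (String × String))) (max_rounds : Int), Dom_group_messages_by_round messages max_rounds → Pre_group_messages_by_round messages max_rounds → Spec_group_messages_by_round messages max_rounds (group_messages_by_round messages max_rounds)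

-- ===== LEMMAS AND PROOFS =====
-- common specification: group `msgs` with a (nonempty) current buffer `rm`
def Gaux (rm : List (List (String × String))) : List (List (String × String)) → List (List (List (String × String)))
  | [] => [rm]
  | m :: t => if pvRole m == some "moderator" then rm :: Gaux [m] t else Gaux (rm ++ [m]) t

theorem loopA (msgs : List (List (String × String)))
    (rounds : List (List (List (String × String)))) (rm : List (List (String × String)))
    (h : rm ≠ []) :
    (let st := msgs.foldl pvStepA (rounds, rm);
     if st.2.isEmpty then st.1 else st.1 ++ [st.2]) = rounds ++ Gaux rm msgs := by
  induction msgs generalizing rounds rm with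
  | nil => simp [Gaux, List.isEmpty_iff, h]
  | cons m t ih =>
    by_cases hm : pvRole m == some "moderator"
    · have : pvStepA (rounds, rm) m = (rounds ++ [rm], [m]) := by
        simp [pvStepA, hm, h]
      simp only [List.foldl_cons, this]
      rw [ih (rounds ++ [rm]) [m] (by simp)]
      simp [Gaux, hm]
    · have : pvStepA (rounds, rm) m = (rounds, rm ++ [m]) := by
        simp [pvStepA, hm]
      simp only [List.foldl_cons, this]
      rw [ih rounds (rm ++ [m]) (by simp)]
      simp [Gaux, hm]

theorem A_eq (messages : List (List (String × String))) (mr : Int) :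
    group_messages_by_round messages mr =
      (match messages with | [] => [] | m :: rest => Gaux [m] rest) := by
  cases messages with
  | nil => simp [group_messages_by_round]
  | cons m rest =>
    have h0 : pvStepA ([], []) m = ([], [m]) := by simp [pvStepA]
    show (let st := (m :: rest).foldl pvStepA ([], []);
          if st.2.isEmpty then st.1 else st.1 ++ [st.2]) = Gaux [m] rest
    simp only [List.foldl_cons, h0]
    rw [loopA rest [] [m] (by simp)]
    simp

theorem Gaux_split (msgs : List (List (String × String))) (rm : List (List (String × String))) :
    Gaux rm msgs =
      (rm ++ msgs.take (altScan msgs)) ::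
        (match msgs.drop (altScan msgs) with
         | [] => []
         | m :: t => Gaux [m] t) := by
  induction msgs generalizing rm with
  | nil => simp [Gaux, altScan]
  | cons m t ih =>
    by_cases hm : pvRole m == some "moderator"
    · simp [Gaux, altScan, hm]
    · simp only [Gaux, altScan, hm, Bool.false_eq_true, if_false]
      rw [ih (rm ++ [m])]
      simp

theorem alt_eq_aux (n : Nat) : ∀ (msgs : List (List (String × String))), msgs.length ≤ n →
    ∀ (mr : Int), group_messages_by_round_alt msgs mr =
      (match msgs with | [] => [] | m :: rest => Gaux [m] rest) := by
  induction n with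
  | zero =>
    intro msgs hlen mr
    cases msgs with
    | nil => rw [group_messages_by_round_alt.eq_def]
    | cons m rest => simp at hlen
  | succ n ih =>
    intro msgs hlen mr
    cases msgs with
    | nil => rw [group_messages_by_round_alt.eq_def]
    | cons m rest =>
      rw [group_messages_by_round_alt.eq_def]
      simp only [List.take_succ_cons, List.drop_succ_cons, Nat.add_comm 1 (altScan rest)] at *
      rw [Gaux_split rest [m]]
      have hdrop : (rest.drop (altScan rest)).length ≤ n := by
        have := List.length_drop (l := rest) (i := altScan rest)
        simp at hlen; omega
      cases hr : rest.drop (altScan rest) with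
      | nil => rw [group_messages_by_round_alt.eq_def]; simp
      | cons m' t =>
        have := ih (m' :: t) (by rw [← hr]; exact hdrop) mr
        simp only [this]
        simp

-- ===== VERDICT (by name: the statement is the Claim_ definition above) =====
theorem group_messages_by_round_spec : Claim_equal_group_messages_by_round := by
  intro messages mr _ _
  show group_messages_by_round messages mr = group_messages_by_round_alt messages mr
  rw [A_eq, alt_eq_aux messages.length messages le_rfl mr]
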